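-- pv_equiv track=rewrite | github.com/robocorp/robotframework-lsp | robotframework-ls/src/robotframework_ls/impl/text_utilities.py | iter_dotted_names
-- ===== SOURCE A (Python) =====
-- def iter_dotted_names(text: str):
--     """
--     list(iter_dotted_names("")) == []
--     list(iter_dotted_names("a")) == []
--     list(iter_dotted_names("a.b")) == [("a", "b")]
--     list(iter_dotted_names(".a.b.")) == [
--         ("", "a.b."),
--         (".a", "b."),
--         (".a.b", ""),
--     ]
--     list(iter_dotted_names("a.b.")) == [("a", "b."), ("a.b", "")]
--     list(iter_dotted_names("a.b.c")) == [("a", "b.c"), ("a.b", "c")]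
--     """
--     splitted = text.split(".")
--     splitted_len = len(splitted)
--     if splitted_len > 1:
--         import io
--
--         buf = io.StringIO()
--
--         for i, name in enumerate(splitted[:-1]):
--             if i > 0:
--                 buf.write(".")
--             buf.write(name)
--             remainder = ".".join(splitted[i + 1 :])
--             head = buf.getvalue()
--             yield head, remainder
-- ===== SOURCE B (Python) =====
-- def iter_dotted_names(text: str):
--     for idx, ch in enumerate(text):
--         if ch == ".":
--             yield text[:idx], text[idx + 1:]
-- ===== Notes on version B (the rewrite author's own statement) =====
-- stated objective: simpler
-- what changed: B makes one direct scan over the characters and yields (text[:i], text[i+1:]) at each dot index, instead of splitting on '.' and rebuilding each head in a StringIO buffer and each remainder with '.'.join of the tail parts.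
import Mathlib
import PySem

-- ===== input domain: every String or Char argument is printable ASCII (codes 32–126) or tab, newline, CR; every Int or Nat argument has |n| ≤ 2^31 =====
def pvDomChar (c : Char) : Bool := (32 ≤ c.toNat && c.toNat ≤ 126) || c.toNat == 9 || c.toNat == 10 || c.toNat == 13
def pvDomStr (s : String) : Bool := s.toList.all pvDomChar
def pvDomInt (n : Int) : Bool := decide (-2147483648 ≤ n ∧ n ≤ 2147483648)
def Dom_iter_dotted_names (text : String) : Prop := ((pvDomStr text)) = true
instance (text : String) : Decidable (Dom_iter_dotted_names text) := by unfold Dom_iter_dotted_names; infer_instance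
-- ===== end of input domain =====

-- B replaces A's split-then-rebuild (split on '.', StringIO buffer for heads, '.'.join for
-- remainders) by a single direct scan that emits (text[:i], text[i+1:]) at each dot index;
-- return values proved equal on all inputs (both are Python generators; neither mutates anything).

-- ===== PORT A =====
-- the for-loop over enumerate(splitted[:-1]) with state (buf, yielded-so-far)
def iterALoop (splitted : List (List Char)) :
    List (Int × List Char) → List Char → List (String × String) → List (String × String)
  | [], _, out => out
  | (i, name) :: rest, buf, out =>
      let buf1 := if i > 0 then buf ++ ['.'] else buf            -- if i > 0: buf.write(".")
      let buf2 := buf1 ++ name                                    -- buf.write(name)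
      let remainder := PySem.Chars.join ['.'] (PySem.List.slice splitted (some (i + 1)))
      iterALoop splitted rest buf2 (out ++ [(String.mk buf2, String.mk remainder)])

def iter_dotted_names (text : String) : List (String × String) :=
  let splitted := PySem.Chars.splitOn text.toList ['.']           -- text.split(".")
  if splitted.length > 1 then
    iterALoop splitted (PySem.List.enumerate (PySem.List.slice splitted none (some (-1)))) [] []
  else []

-- ===== PORT B =====
-- for idx, ch in enumerate(text): if ch == '.': yield text[:idx], text[idx+1:]
def iterBLoop (s : List Char) :
    List (Int × Char) → List (String × String) → List (String × String)
  | [], out => out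
  | (i, ch) :: rest, out =>
      if ch = '.' then
        iterBLoop s rest
          (out ++ [(String.mk (PySem.List.slice s none (some i)),
                    String.mk (PySem.List.slice s (some (i + 1))))])
      else iterBLoop s rest out

def iter_dotted_names_alt (text : String) : List (String × String) :=
  iterBLoop text.toList (PySem.List.enumerate text.toList) []

-- ===== PRECONDITION & SPEC =====
def Spec_iter_dotted_names (text : String) (out : List (String × String)) : Prop := out = iter_dotted_names_alt text
instance (text : String) (out : List (String × String)) : Decidable (Spec_iter_dotted_names text out) := by unfold Spec_iter_dotted_names; infer_instance

-- ===== CLAIM (what is proved, stated in full; the proofs are below) =====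
def Claim_equal_iter_dotted_names : Prop := ∀ (text : String), Dom_iter_dotted_names text → Spec_iter_dotted_names text (iter_dotted_names text)

-- ===== LEMMAS AND PROOFS =====

-- a simple accumulator form of text.split(".")
def mySplit (cur : List Char) : List Char → List (List Char)
  | [] => [cur]
  | c :: rest => if c = '.' then cur :: mySplit [] rest else mySplit (cur ++ [c]) rest

-- the common specification: the pairs (prefix-before-dot, suffix-after-dot), scanning left to right
def goSpec (pre : List Char) : List Char → List (String × String)
  | [] => []
  | c :: rest =>
      (if c = '.' then [(String.mk pre, String.mk rest)] else []) ++ goSpec (pre ++ [c]) rest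

-- A's loop, reformulated on the parts before the last one, carrying the final part
def bChain (last : List Char) : List Char → Bool → List (List Char) → List (String × String)
  | _, _, [] => []
  | buf, first, q :: qs =>
      let buf' := (if first then buf else buf ++ ['.']) ++ q
      (String.mk buf', String.mk (PySem.Chars.join ['.'] (qs ++ [last]))) :: bChain last buf' false qs

-- A's loop over the enumerated parts, with absolute index k into the full splitted list
def aChain (F : List (List Char)) : List Char → Nat → List (List Char) → List (String × String)
  | _, _, [] => []
  | buf, k, q :: qs =>
      let buf' := (if 0 < k then buf ++ ['.'] else buf) ++ q
      (String.mk buf', String.mk (PySem.Chars.join ['.'] (F.drop (k + 1)))) :: aChain F buf' (k + 1) qs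

theorem mySplit_cons (cur : List Char) (c : Char) (rest : List Char) :
    mySplit cur (c :: rest) = if c = '.' then cur :: mySplit [] rest else mySplit (cur ++ [c]) rest := rfl

theorem iterBLoop_cons (s : List Char) (i : Int) (ch : Char) (rest : List (Int × Char)) (out : List (String × String)) :
    iterBLoop s ((i, ch) :: rest) out =
      if ch = '.' then
        iterBLoop s rest
          (out ++ [(String.mk (PySem.List.slice s none (some i)),
                    String.mk (PySem.List.slice s (some (i + 1))))])
      else iterBLoop s rest out := rfl

theorem goSpec_cons (pre : List Char) (c : Char) (rest : List Char) :
    goSpec pre (c :: rest) =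
      (if c = '.' then [(String.mk pre, String.mk rest)] else []) ++ goSpec (pre ++ [c]) rest := rfl

theorem splitOn_go_eq (l : List Char) : ∀ (fuel : Nat) (cur : List Char) (acc : List (List Char)),
    l.length ≤ fuel →
    PySem.Chars.splitOn.go ['.'] fuel l cur acc = acc.reverse ++ mySplit cur.reverse l := by
  induction l with
  | nil =>
      intro fuel cur acc _
      cases fuel <;> simp [PySem.Chars.splitOn.go, mySplit]
  | cons c rest ih =>
      intro fuel cur acc hle
      cases fuel with
      | zero => simp at hle
      | succ f =>
        by_cases hc : c = '.'
        · subst hc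
          have hpre : ['.'].isPrefixOf ('.' :: rest) = true := by simp [List.isPrefixOf]
          rw [PySem.Chars.splitOn.go, if_pos hpre]
          have hdrop : List.drop ['.'].length ('.' :: rest) = rest := rfl
          rw [hdrop]
          simp only [List.length_cons] at hle
          rw [ih f [] (cur.reverse :: acc) (by omega)]
          simp [mySplit]
        · have hpre : ['.'].isPrefixOf (c :: rest) = false := by
            simp [List.isPrefixOf]; exact fun h => absurd h.symm hc
          rw [PySem.Chars.splitOn.go, if_neg (by simp [hpre])]
          simp only [List.length_cons] at hle
          rw [ih f (c :: cur) acc (by omega)]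
          simp [mySplit, hc]

theorem splitOn_eq (s : List Char) : PySem.Chars.splitOn s ['.'] = mySplit [] s := by
  unfold PySem.Chars.splitOn
  rw [splitOn_go_eq s (s.length + 1) [] [] (by omega)]
  simp

theorem mySplit_ne_nil (s : List Char) : ∀ cur, mySplit cur s ≠ [] := by
  induction s with
  | nil => intro cur; simp [mySplit]
  | cons c rest ih => intro cur; by_cases hc : c = '.' <;> simp [mySplit, hc, ih]

theorem join_cons_of_ne_nil (p : List Char) (l : List (List Char)) (h : l ≠ []) :
    PySem.Chars.join ['.'] (p :: l) = p ++ '.' :: PySem.Chars.join ['.'] l := by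
  obtain ⟨q, qs, hq⟩ := List.exists_cons_of_ne_nil h
  subst hq
  rw [PySem.Chars.join_cons_cons]
  simp

theorem join_mySplit (s : List Char) : ∀ cur, PySem.Chars.join ['.'] (mySplit cur s) = cur ++ s := by
  induction s with
  | nil => intro cur; simp [mySplit, PySem.Chars.join_singleton]
  | cons c rest ih =>
      intro cur
      by_cases hc : c = '.'
      · subst hc
        rw [mySplit_cons, if_pos rfl,
            join_cons_of_ne_nil cur (mySplit [] rest) (mySplit_ne_nil rest []), ih []]
        simp
      · rw [mySplit_cons, if_neg hc, ih (cur ++ [c])]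
        simp

theorem mySplit_dotfree (s : List Char) : ∀ cur, '.' ∉ cur →
    ∀ p ∈ mySplit cur s, '.' ∉ p := by
  induction s with
  | nil => intro cur hcur p hp; simp [mySplit] at hp; subst hp; exact hcur
  | cons c rest ih =>
      intro cur hcur p hp
      by_cases hc : c = '.'
      · subst hc
        rw [mySplit_cons, if_pos rfl] at hp
        rcases List.mem_cons.mp hp with h | h
        · subst h; exact hcur
        · exact ih [] (by simp) p h
      · rw [mySplit_cons, if_neg hc] at hp
        exact ih (cur ++ [c]) (by simp [hcur, Ne.symm hc]) p hp

theorem goSpec_dotfree (s : List Char) : ∀ pre, '.' ∉ s → goSpec pre s = [] := by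
  induction s with
  | nil => intro pre _; simp [goSpec]
  | cons c rest ih =>
      intro pre h
      simp only [List.mem_cons, not_or] at h
      simp [goSpec, Ne.symm h.1, ih _ h.2]

theorem goSpec_skip (p : List Char) : ∀ (s pre : List Char), '.' ∉ p →
    goSpec pre (p ++ s) = goSpec (pre ++ p) s := by
  induction p with
  | nil => intro s pre _; simp
  | cons c q ih =>
      intro s pre h
      simp only [List.mem_cons, not_or] at h
      simp only [List.cons_append, goSpec, Ne.symm h.1, if_neg, List.nil_append]
      rw [ih s (pre ++ [c]) h.2]
      simp

theorem bChain_false (last : List Char) (qs : List (List Char)) (buf : List Char) :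
    bChain last buf false qs = bChain last (buf ++ ['.']) true qs := by
  cases qs <;> simp [bChain]

theorem go_bChain (last : List Char) (qs : List (List Char)) : ∀ (pre : List Char),
    (∀ p ∈ qs, '.' ∉ p) → '.' ∉ last →
    goSpec pre (PySem.Chars.join ['.'] (qs ++ [last])) = bChain last pre true qs := by
  induction qs with
  | nil =>
      intro pre _ hlast
      simp only [List.nil_append, PySem.Chars.join_singleton]
      simp [goSpec_dotfree last pre hlast, bChain]
  | cons q qs ih =>
      intro pre hdf hlast
      have hq : '.' ∉ q := hdf q (by simp)
      have hdf' : ∀ p ∈ qs, '.' ∉ p := fun p hp => hdf p (by simp [hp])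
      rw [List.cons_append, join_cons_of_ne_nil q (qs ++ [last]) (by simp)]
      rw [goSpec_skip q _ pre hq]
      simp only [goSpec, if_pos rfl, List.singleton_append]
      rw [ih (pre ++ q ++ ['.']) hdf' hlast]
      simp [bChain, bChain_false]

theorem iterBLoop_eq (v : List Char) : ∀ (u : List Char) (out : List (String × String)),
    iterBLoop (u ++ v) (PySem.List.enumerate v (u.length : Int)) out = out ++ goSpec u v := by
  induction v with
  | nil => intro u out; simp [iterBLoop, goSpec]
  | cons c v' ih =>
      intro u out
      rw [PySem.List.enumerate_cons]
      have hsplit : u ++ c :: v' = (u ++ [c]) ++ v' := by simp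
      have hcast : (u.length : Int) + 1 = (((u ++ [c]).length : Nat) : Int) := by
        push_cast [List.length_append]; simp [add_comm]
      by_cases hc : c = '.'
      · subst hc
        rw [iterBLoop_cons, if_pos rfl]
        have h1 : PySem.List.slice (u ++ '.' :: v') none (some (u.length : Int)) = u := by
          rw [PySem.List.slice_to _ (by positivity)]
          simp [List.take_left]
        have h2 : PySem.List.slice (u ++ '.' :: v') (some ((u.length : Int) + 1)) = v' := by
          have he : ((u.length : Int) + 1) = ((u.length + 1 : Nat) : Int) := by push_cast; ring
          rw [he, PySem.List.slice_from _ (by positivity)]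
          rw [show u ++ '.' :: v' = (u ++ ['.']) ++ v' from by simp]
          simp only [Int.toNat_natCast]
          rw [show u.length + 1 = (u ++ ['.']).length from by simp, List.drop_left]
        rw [h1, h2, hcast, hsplit, ih (u ++ ['.']) (out ++ [(String.mk u, String.mk v')])]
        rw [goSpec_cons, if_pos rfl]
        simp
      · rw [iterBLoop_cons, if_neg hc]
        rw [hcast, hsplit, ih (u ++ [c]) out, goSpec_cons, if_neg hc]
        simp

theorem iterALoop_eq (F : List (List Char)) (qs : List (List Char)) :
    ∀ (k : Nat) (buf : List Char) (out : List (String × String)),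
    iterALoop F (PySem.List.enumerate qs (k : Int)) buf out = out ++ aChain F buf k qs := by
  induction qs with
  | nil => intro k buf out; simp [iterALoop, aChain]
  | cons q qs' ih =>
      intro k buf out
      rw [PySem.List.enumerate_cons]
      simp only [iterALoop]
      have hif : ((k : Int) > 0) = (0 < k) := by simp
      have hslice : PySem.List.slice F (some ((k : Int) + 1)) = F.drop (k + 1) := by
        have : ((k : Int) + 1) = ((k + 1 : Nat) : Int) := by push_cast; ring
        rw [this, PySem.List.slice_from _ (by positivity)]
        simp
      have hcast : (k : Int) + 1 = ((k + 1 : Nat) : Int) := by push_cast; ring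
      rw [hslice, hcast, ih (k + 1)]
      simp only [aChain]
      have : (if (k : Int) > 0 then buf ++ ['.'] else buf) = (if 0 < k then buf ++ ['.'] else buf) := by
        by_cases hk : 0 < k <;> simp [hk]
      rw [this]
      simp

theorem aChain_eq_bChain (last : List Char) (qs : List (List Char)) :
    ∀ (F : List (List Char)) (k : Nat) (buf : List Char), F.drop k = qs ++ [last] →
    aChain F buf k qs = bChain last buf (k == 0) qs := by
  induction qs with
  | nil => intro F k buf _; simp [aChain, bChain]
  | cons q qs' ih =>
      intro F k buf hdrop
      have hdrop' : F.drop (k + 1) = qs' ++ [last] := by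
        have : F.drop (k + 1) = (F.drop k).drop 1 := by rw [List.drop_drop]
        rw [this, hdrop]
        simp
      have hbuf : (if 0 < k then buf ++ ['.'] else buf) = (if (k == 0) = true then buf else buf ++ ['.']) := by
        cases k <;> simp
      simp only [aChain, bChain, hdrop', hbuf]
      rw [ih F (k + 1) _ hdrop']
      simp

theorem alt_eq_goSpec (text : String) : iter_dotted_names_alt text = goSpec [] text.toList := by
  unfold iter_dotted_names_alt
  have := iterBLoop_eq text.toList [] []
  simpa using this

theorem slice_neg_one_dropLast (F : List (List Char)) (h : F ≠ []) :
    PySem.List.slice F none (some (-1)) = F.dropLast := by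
  have hlen : 1 ≤ F.length := List.length_pos_iff.mpr h
  have hcl : PySem.List.clampIdx F.length (-1) = F.length - 1 := by
    unfold PySem.List.clampIdx; split_ifs <;> omega
  simp [PySem.List.slice, hcl, List.dropLast_eq_take]
-- ===== VERDICT (by name: the statement is the Claim_ definition above) =====
theorem iter_dotted_names_spec : Claim_equal_iter_dotted_names := by
  intro text _
  unfold Spec_iter_dotted_names
  rw [alt_eq_goSpec]
  unfold iter_dotted_names
  simp only [splitOn_eq]
  set s := text.toList with hs
  have hne := mySplit_ne_nil s []
  have hjoin := join_mySplit s []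
  have hdf := mySplit_dotfree s [] (by simp)
  by_cases hlen : (mySplit [] s).length > 1
  · rw [if_pos hlen]
    obtain ⟨qs, last, hql⟩ := List.eq_nil_or_concat (mySplit [] s) |>.resolve_left hne
    rw [List.concat_eq_append] at hql
    rw [slice_neg_one_dropLast _ hne, hql, List.dropLast_concat]
    have hA := iterALoop_eq (qs ++ [last]) qs 0 [] []
    norm_num at hA
    rw [hA]
    rw [aChain_eq_bChain last qs (qs ++ [last]) 0 [] (by simp)]
    show bChain last [] true qs = goSpec [] s
    rw [← go_bChain last qs [] (fun p hp => hdf p (by rw [hql]; exact List.mem_append_left _ hp))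
        (hdf last (by rw [hql]; simp))]
    rw [← hql, hjoin]
    simp
  · rw [if_neg hlen]
    have : ∃ p, mySplit [] s = [p] := by
      cases hsp : mySplit [] s with
      | nil => exact absurd hsp hne
      | cons p t =>
        cases t with
        | nil => exact ⟨p, rfl⟩
        | cons _ _ => rw [hsp] at hlen; simp at hlen
    obtain ⟨p, hp⟩ := this
    have hps : p = s := by
      rw [hp, PySem.Chars.join_singleton] at hjoin
      simpa using hjoin
    have : '.' ∉ s := by rw [← hps]; exact hdf p (by rw [hp]; simp)
    rw [goSpec_dotfree s [] this]
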